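-- pv_equiv track=rewrite | github.com/pypi-data/pypi-mirror-362 | packages/lazylinop/lazylinop-1.18.2-py3-none-any.whl/lazylinop/butterfly/ksd.py | _balanced_permutation
-- ===== SOURCE A (Python) =====
-- def _balanced_permutation(k):
--     if k == 1:
--         return [1]
--     elif k == 2:
--         return [1, 2]
--     if k % 2 == 0:
--         left_perm = _balanced_permutation((k // 2) - 1)
--         right_perm = [
--             i + (k + 1) // 2 for i in _balanced_permutation(k // 2)]
--         return [k // 2] + left_perm + right_perm
--     elif k % 2 == 1:
--         left_perm = _balanced_permutation(k // 2)
--         right_perm = [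
--             i + (k + 1) // 2 for i in _balanced_permutation(k // 2)]
--         return [k // 2 + 1] + left_perm + right_perm
-- ===== SOURCE B (Python) =====
-- def _balanced_permutation(k):
--     out = [0] * k
--
--     def fill(pos, n, off):
--         # write the balanced permutation of 1..n, shifted by off, into out[pos:pos+n]
--         if n == 1:
--             out[pos] = 1 + off
--         elif n == 2:
--             out[pos] = 1 + off
--             out[pos + 1] = 2 + off
--         elif n % 2 == 0:
--             out[pos] = n // 2 + off
--             fill(pos + 1, n // 2 - 1, off)
--             fill(pos + n // 2, n // 2, off + (n + 1) // 2)
--         else: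
--             out[pos] = n // 2 + 1 + off
--             fill(pos + 1, n // 2, off)
--             fill(pos + 1 + n // 2, n // 2, off + (n + 1) // 2)
--
--     fill(0, k, 0)
--     return out
-- ===== Notes on version B (the rewrite author's own statement) =====
-- stated objective: faster
-- what changed: B preallocates the output array once and fills it by a recursive in-place writer with (position, size, offset) parameters, instead of A's recursion that builds lists and pays a full concatenation plus a shifting map pass at every level.
import Mathlib
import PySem

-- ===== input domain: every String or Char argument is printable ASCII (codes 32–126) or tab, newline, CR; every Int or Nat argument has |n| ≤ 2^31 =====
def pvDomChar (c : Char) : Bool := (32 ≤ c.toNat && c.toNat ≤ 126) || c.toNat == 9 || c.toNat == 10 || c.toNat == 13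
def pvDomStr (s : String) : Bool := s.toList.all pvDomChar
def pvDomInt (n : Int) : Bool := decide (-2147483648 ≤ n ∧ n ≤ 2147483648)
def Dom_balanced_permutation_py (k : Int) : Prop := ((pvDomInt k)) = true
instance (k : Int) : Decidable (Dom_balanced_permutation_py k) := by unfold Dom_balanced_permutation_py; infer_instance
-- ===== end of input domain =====

-- B preallocates the output once and fills it in place by a (position, size, offset)
-- recursion instead of A's list-concatenating recursion (objective: faster).

-- ===== PORT A =====
def balanced_permutation_py (k : Int) : List Int :=
  if k = 1 then [1]
  else if k = 2 then [1, 2]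
  else if k ≤ 0 then []
  else if PySem.Int.mod k 2 = 0 then
    let left_perm := balanced_permutation_py (PySem.Int.floordiv k 2 - 1)
    let right_perm := (balanced_permutation_py (PySem.Int.floordiv k 2)).map
      (fun i => i + PySem.Int.floordiv (k + 1) 2)
    [PySem.Int.floordiv k 2] ++ left_perm ++ right_perm
  else
    let left_perm := balanced_permutation_py (PySem.Int.floordiv k 2)
    let right_perm := (balanced_permutation_py (PySem.Int.floordiv k 2)).map
      (fun i => i + PySem.Int.floordiv (k + 1) 2)
    [PySem.Int.floordiv k 2 + 1] ++ left_perm ++ right_perm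
termination_by k.toNat
decreasing_by
  all_goals
    rw [PySem.Int.floordiv_eq_ediv_of_pos (by omega : (0:Int) < 2)]
    omega

-- ===== PORT B =====
-- in-place writer: writes the balanced permutation of 1..n, shifted by off, into out[pos:pos+n]
def bpFill (out : List Int) (pos n off : Int) : List Int :=
  if n = 1 then out.set pos.toNat (1 + off)
  else if n = 2 then (out.set pos.toNat (1 + off)).set (pos + 1).toNat (2 + off)
  else if n ≤ 0 then out
  else if PySem.Int.mod n 2 = 0 then
    bpFill
      (bpFill (out.set pos.toNat (PySem.Int.floordiv n 2 + off))
        (pos + 1) (PySem.Int.floordiv n 2 - 1) off)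
      (pos + PySem.Int.floordiv n 2) (PySem.Int.floordiv n 2)
      (off + PySem.Int.floordiv (n + 1) 2)
  else
    bpFill
      (bpFill (out.set pos.toNat (PySem.Int.floordiv n 2 + 1 + off))
        (pos + 1) (PySem.Int.floordiv n 2) off)
      (pos + 1 + PySem.Int.floordiv n 2) (PySem.Int.floordiv n 2)
      (off + PySem.Int.floordiv (n + 1) 2)
termination_by n.toNat
decreasing_by
  all_goals
    rw [PySem.Int.floordiv_eq_ediv_of_pos (by omega : (0:Int) < 2)]
    omega


def balanced_permutation_py_alt (k : Int) : List Int :=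
  bpFill (List.replicate k.toNat 0) 0 k 0

-- ===== PRECONDITION & SPEC =====
-- Pre_ excludes exactly k ≤ 0, where Python A raises RecursionError (and B raises IndexError).
def Pre_balanced_permutation_py (k : Int) : Prop := 1 ≤ k
instance (k : Int) : Decidable (Pre_balanced_permutation_py k) := by
  unfold Pre_balanced_permutation_py; infer_instance

def pvWitness_balanced_permutation_py : Int := 7

def Spec_balanced_permutation_py (k : Int) (out : List Int) : Prop := out = balanced_permutation_py_alt k
instance (k : Int) (out : List Int) : Decidable (Spec_balanced_permutation_py k out) := by unfold Spec_balanced_permutation_py; infer_instance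

-- ===== CLAIM (what is proved, stated in full; the proofs are below) =====
def Claim_equal_balanced_permutation_py : Prop := ∀ (k : Int), Dom_balanced_permutation_py k → Pre_balanced_permutation_py k → Spec_balanced_permutation_py k (balanced_permutation_py k)

-- ===== LEMMAS AND PROOFS =====

theorem bp_length (k : Int) (hk : 1 ≤ k) :
    (balanced_permutation_py k).length = k.toNat := by
  induction k using balanced_permutation_py.induct with
  | case1 => simp [balanced_permutation_py]
  | case2 => simp [balanced_permutation_py]
  | case3 k h1 h2 h3 => omega
  | case4 k h1 h2 h3 h4 ih1 ih2 =>
    rw [balanced_permutation_py]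
    simp only [if_neg h1, if_neg h2, if_neg h3, if_pos h4]
    rw [PySem.Int.mod_eq_emod_of_pos (by omega : (0:Int) < 2)] at h4
    rw [PySem.Int.floordiv_eq_ediv_of_pos (by omega : (0:Int) < 2)] at *
    have hk4 : 4 ≤ k := by omega
    simp only [List.length_append, List.length_map, List.length_cons, List.length_nil]
    rw [ih1 (by omega), ih2 (by omega)]
    omega
  | case5 k h1 h2 h3 h4 ih1 =>
    rw [balanced_permutation_py]
    simp only [if_neg h1, if_neg h2, if_neg h3, if_neg h4]
    rw [PySem.Int.mod_eq_emod_of_pos (by omega : (0:Int) < 2)] at h4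
    rw [PySem.Int.floordiv_eq_ediv_of_pos (by omega : (0:Int) < 2)] at *
    have hk3 : 3 ≤ k := by omega
    simp only [List.length_append, List.length_map, List.length_cons, List.length_nil]
    rw [ih1 (by omega)]
    omega

def splice (out : List Int) (p : Nat) (l : List Int) : List Int :=
  out.take p ++ l ++ out.drop (p + l.length)

theorem splice_set (out : List Int) (p : Nat) (v : Int) (hp : p < out.length) :
    out.set p v = splice out p [v] := by
  simp [splice, List.set_eq_take_append_cons_drop, hp]

theorem splice_splice (out : List Int) (p : Nat) (l₁ l₂ : List Int)
    (h : p + l₁.length + l₂.length ≤ out.length) :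
    splice (splice out p l₁) (p + l₁.length) l₂ = splice out p (l₁ ++ l₂) := by
  simp only [splice, List.length_append]
  rw [List.take_append, List.take_append, List.drop_append, List.drop_append]
  simp only [List.length_take, List.length_append]
  rw [List.take_take]
  have h1 : min p out.length = p := by omega
  have h2 : min (p + l₁.length) p = p := by omega
  rw [h1, h2]
  have h3 : p + l₁.length - p = l₁.length := by omega
  have h4 : p + l₁.length + l₂.length - p = l₁.length + l₂.length := by omega
  rw [h3, h4]
  have e2 : List.drop (l₁.length + l₂.length) l₁ = [] := List.drop_eq_nil_of_le (by omega)
  have e1 : List.drop (p + (l₁.length + l₂.length)) (List.take p out) = [] :=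
    List.drop_eq_nil_of_le (by rw [List.length_take]; omega)
  simp [e1, e2, Nat.add_assoc]

theorem splice_length (out : List Int) (p : Nat) (l : List Int)
    (h : p + l.length ≤ out.length) : (splice out p l).length = out.length := by
  simp [splice]; omega

theorem bpFill_go : ∀ (N : Nat) (n : Int), n.toNat ≤ N → ∀ (out : List Int) (pos off : Int),
    1 ≤ n → 0 ≤ pos → pos.toNat + n.toNat ≤ out.length →
    bpFill out pos n off = splice out pos.toNat ((balanced_permutation_py n).map (· + off)) := by
  intro N
  induction N with
  | zero => intro n hN _ _ _ hn _ _; omega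
  | succ N ih =>
    intro n hN out pos off hn hpos hlen
    rw [bpFill]
    by_cases h1 : n = 1
    · subst h1
      rw [if_pos rfl, splice_set out pos.toNat (1 + off) (by omega)]
      simp [balanced_permutation_py]
    by_cases h2 : n = 2
    · subst h2
      rw [if_neg h1, if_pos rfl]
      have e1 : (pos + 1).toNat = pos.toNat + 1 := by omega
      have hl : pos.toNat < out.length := by omega
      have hl2 : pos.toNat + 1 < (out.set pos.toNat (1 + off)).length := by simp; omega
      rw [e1, splice_set _ _ _ hl2, splice_set out pos.toNat (1 + off) hl]
      have := splice_splice out pos.toNat [1 + off] [2 + off] (by simp; omega)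
      simp only [List.length_cons, List.length_nil] at this
      rw [this]
      simp [balanced_permutation_py]
    have h3 : ¬ n ≤ 0 := by omega
    have hm : PySem.Int.floordiv n 2 = n / 2 :=
      PySem.Int.floordiv_eq_ediv_of_pos (by omega)
    have hs : PySem.Int.floordiv (n + 1) 2 = (n + 1) / 2 :=
      PySem.Int.floordiv_eq_ediv_of_pos (by omega)
    have hmod : PySem.Int.mod n 2 = n % 2 :=
      PySem.Int.mod_eq_emod_of_pos (by omega)
    by_cases h4 : PySem.Int.mod n 2 = 0
    · -- even, n ≥ 4
      rw [if_neg h1, if_neg h2, if_neg h3, if_pos h4, hm, hs]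
      rw [hmod] at h4
      have hn4 : 4 ≤ n := by omega
      -- inner fill
      have hlen1 : (pos + 1).toNat + (n / 2 - 1).toNat ≤
          (out.set pos.toNat (n / 2 + off)).length := by simp; omega
      rw [ih (n / 2 - 1) (by omega) _ (pos + 1) off (by omega) (by omega) hlen1]
      have hL : ((balanced_permutation_py (n / 2 - 1)).map (· + off)).length
          = (n / 2 - 1).toNat := by
        simp [bp_length (n / 2 - 1) (by omega)]
      have hsl : (splice (out.set pos.toNat (n / 2 + off)) (pos + 1).toNat
          ((balanced_permutation_py (n / 2 - 1)).map (· + off))).length = out.length := by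
        rw [splice_length, List.length_set]
        rw [List.length_set, hL]; omega
      rw [ih (n / 2) (by omega) _ (pos + n / 2) (off + (n + 1) / 2) (by omega) (by omega)
        (by rw [hsl]; omega)]
      -- now pure splice algebra
      have e1 : (pos + 1).toNat = pos.toNat + 1 := by omega
      have e2 : (pos + n / 2).toNat = pos.toNat + (n / 2).toNat := by omega
      rw [e1, e2, splice_set out pos.toNat (n / 2 + off) (by omega)]
      have s1 := splice_splice out pos.toNat [n / 2 + off]
        ((balanced_permutation_py (n / 2 - 1)).map (· + off)) (by simp [hL]; omega)
      simp only [List.length_cons, List.length_nil] at s1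
      rw [s1]
      have s2 := splice_splice out pos.toNat
        ([n / 2 + off] ++ (balanced_permutation_py (n / 2 - 1)).map (· + off))
        ((balanced_permutation_py (n / 2)).map (· + (off + (n + 1) / 2)))
        (by simp [hL, bp_length (n / 2) (by omega)]; omega)
      simp only [List.length_append, List.length_cons, List.length_nil, hL] at s2
      have e3 : pos.toNat + (1 + (n / 2 - 1).toNat) = pos.toNat + (n / 2).toNat := by omega
      rw [e3] at s2
      rw [s2]
      conv_rhs => rw [balanced_permutation_py]
      rw [if_neg h1, if_neg h2, if_neg h3, if_pos (by rw [hmod]; exact h4), hm, hs]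
      congr 1
      simp [List.map_map]
      intro a _
      ring
    · -- odd, n ≥ 3
      rw [if_neg h1, if_neg h2, if_neg h3, if_neg h4, hm, hs]
      rw [hmod] at h4
      have hn3 : 3 ≤ n := by omega
      have hlen1 : (pos + 1).toNat + (n / 2).toNat ≤
          (out.set pos.toNat (n / 2 + 1 + off)).length := by simp; omega
      rw [ih (n / 2) (by omega) _ (pos + 1) off (by omega) (by omega) hlen1]
      have hL : ((balanced_permutation_py (n / 2)).map (· + off)).length
          = (n / 2).toNat := by
        simp [bp_length (n / 2) (by omega)]
      have hsl : (splice (out.set pos.toNat (n / 2 + 1 + off)) (pos + 1).toNat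
          ((balanced_permutation_py (n / 2)).map (· + off))).length = out.length := by
        rw [splice_length, List.length_set]
        rw [List.length_set, hL]; omega
      rw [ih (n / 2) (by omega) _ (pos + 1 + n / 2) (off + (n + 1) / 2) (by omega) (by omega)
        (by rw [hsl]; omega)]
      have e1 : (pos + 1).toNat = pos.toNat + 1 := by omega
      have e2 : (pos + 1 + n / 2).toNat = pos.toNat + (1 + (n / 2).toNat) := by omega
      rw [e1, e2, splice_set out pos.toNat (n / 2 + 1 + off) (by omega)]
      have s1 := splice_splice out pos.toNat [n / 2 + 1 + off]
        ((balanced_permutation_py (n / 2)).map (· + off)) (by simp [hL]; omega)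
      simp only [List.length_cons, List.length_nil] at s1
      rw [s1]
      have s2 := splice_splice out pos.toNat
        ([n / 2 + 1 + off] ++ (balanced_permutation_py (n / 2)).map (· + off))
        ((balanced_permutation_py (n / 2)).map (· + (off + (n + 1) / 2)))
        (by simp [hL, bp_length (n / 2) (by omega)]; omega)
      simp only [List.length_append, List.length_cons, List.length_nil, hL] at s2
      rw [s2]
      conv_rhs => rw [balanced_permutation_py]
      rw [if_neg h1, if_neg h2, if_neg h3, if_neg (by rw [hmod]; exact h4), hm, hs]
      congr 1
      simp [List.map_map]
      intro a _
      ring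

-- ===== VERDICT (by name: the statement is the Claim_ definition above) =====
theorem balanced_permutation_py_spec : Claim_equal_balanced_permutation_py := by
  intro k _ hk
  have hk' : (1 : Int) ≤ k := hk
  unfold Spec_balanced_permutation_py balanced_permutation_py_alt
  rw [bpFill_go k.toNat k le_rfl _ 0 0 hk' le_rfl (by simp)]
  simp [splice, bp_length k hk']
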